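-- pv_equiv track=rewrite | github.com/pirratoz/university | ics/fsm/utils/coding_machine.py | __get_Carnot_state_headers
-- ===== SOURCE A (Python) =====
-- def __get_Carnot_state_headers(vector_size: int) -> list[str]:
--     Q = ["" for _ in range(vector_size)]
--     for i in range(vector_size):
--         Q[i] = "0" * 2 ** i + "1" * 2 ** i
--     for i in range(0, vector_size - 1):
--         for _ in range(vector_size - (i + 1)):
--             Q[i] += Q[i][::-1]
--     return Q
-- ===== SOURCE B (Python) =====
-- def __get_Carnot_state_headers(vector_size: int) -> list[str]:
--     # Each header row i is periodic with period 4*2**i: the palindrome block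
--     # "0"*2**i + "1"*2**(i+1) + "0"*2**i, repeated (and truncated for the top row).
--     if vector_size <= 0:
--         return []
--     size = 1 << vector_size
--     headers = []
--     for i in range(vector_size):
--         block = 1 << i
--         pattern = "0" * block + "1" * (2 * block) + "0" * block
--         headers.append((pattern * max(1, size // (4 * block)))[:size])
--     return headers
-- ===== Notes on version B (the rewrite author's own statement) =====
-- stated objective: alternative
-- what changed: Builds each row directly as its periodic palindrome block '0'*2**i + '1'*2**(i+1) + '0'*2**i repeated (and truncated) to length 2**n, replacing A's reflect-and-append doubling loop that repeatedly reverses and concatenates ever larger strings.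
import Mathlib
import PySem

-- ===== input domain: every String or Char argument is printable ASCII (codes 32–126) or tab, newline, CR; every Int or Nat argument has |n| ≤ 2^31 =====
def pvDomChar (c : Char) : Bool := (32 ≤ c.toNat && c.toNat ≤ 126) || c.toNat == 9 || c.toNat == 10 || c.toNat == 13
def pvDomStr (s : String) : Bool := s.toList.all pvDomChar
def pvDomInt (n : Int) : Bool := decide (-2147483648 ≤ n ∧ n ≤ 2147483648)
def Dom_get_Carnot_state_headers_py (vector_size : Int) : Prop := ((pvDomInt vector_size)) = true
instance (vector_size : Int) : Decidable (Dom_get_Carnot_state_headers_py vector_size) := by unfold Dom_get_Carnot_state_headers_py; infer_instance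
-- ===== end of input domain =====

-- B replaces A's reflect-and-append doubling loop by emitting each row directly as its
-- periodic palindrome block "0"*2**i + "1"*2**(i+1) + "0"*2**i repeated to length 2**n
-- (one bulk repeat per row instead of A's n-i reverse-and-copy passes).

-- ===== PORT A =====
-- Python strings are carried as List Char (PySem style) and wrapped with String.ofList on return.
-- 's[::-1]' is List.reverse (PySem.List.slice?_none_none_neg_one); '2 ** i' with i ≥ 0 is 2 ^ i.toNat.
def get_Carnot_state_headers_py (vector_size : Int) : List String :=
  -- Q = ["" for _ in range(vector_size)]
  let Q : List (List Char) := (PySem.List.pyRange 0 vector_size 1).map (fun _ => ([] : List Char))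
  -- for i in range(vector_size): Q[i] = "0" * 2 ** i + "1" * 2 ** i
  let Q := (PySem.List.pyRange 0 vector_size 1).foldl
    (fun Q i => Q.set i.toNat
      (List.replicate (2 ^ i.toNat) '0' ++ List.replicate (2 ^ i.toNat) '1')) Q
  -- for i in range(0, vector_size - 1): for _ in range(vector_size - (i + 1)): Q[i] += Q[i][::-1]
  let Q := (PySem.List.pyRange 0 (vector_size - 1) 1).foldl
    (fun Q i => (PySem.List.pyRange 0 (vector_size - (i + 1)) 1).foldl
      (fun Q _ =>
        Q.set i.toNat (PySem.List.pyGetD Q i [] ++ (PySem.List.pyGetD Q i []).reverse)) Q) Q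
  -- return Q
  Q.map String.ofList

-- ===== PORT B =====
-- '1 << k' with k > 0 is 2 ^ k.toNat; 'size // (4 * block)' on nonnegative ints is Nat division (exact).
def get_Carnot_state_headers_py_alt (vector_size : Int) : List String :=
  if vector_size ≤ 0 then []
  else
    let size : Nat := 2 ^ vector_size.toNat
    (PySem.List.pyRange 0 vector_size 1).foldl (fun headers i =>
      let block : Nat := 2 ^ i.toNat
      let pattern : List Char :=
        List.replicate block '0' ++ List.replicate (2 * block) '1' ++ List.replicate block '0'
      headers ++ [String.ofList
        ((PySem.List.pyRepeat pattern ((max 1 (size / (4 * block)) : Nat) : Int)).take size)])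
      []

-- ===== PRECONDITION & SPEC =====
def Spec_get_Carnot_state_headers_py (vector_size : Int) (out : List String) : Prop := out = get_Carnot_state_headers_py_alt vector_size
instance (vector_size : Int) (out : List String) : Decidable (Spec_get_Carnot_state_headers_py vector_size out) := by unfold Spec_get_Carnot_state_headers_py; infer_instance

-- ===== CLAIM (what is proved, stated in full; the proofs are below) =====
def Claim_equal_get_Carnot_state_headers_py : Prop := ∀ (vector_size : Int), Dom_get_Carnot_state_headers_py vector_size → Spec_get_Carnot_state_headers_py vector_size (get_Carnot_state_headers_py vector_size)

-- ===== LEMMAS AND PROOFS =====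

/-- A's reflect-append step. -/
def pvDub (s : List Char) : List Char := s ++ s.reverse
/-- A's row seed for index k. -/
def pvBase (k : Nat) : List Char := List.replicate (2 ^ k) '0' ++ List.replicate (2 ^ k) '1'
/-- B's periodic block for index k. -/
def pvPat (k : Nat) : List Char :=
  List.replicate (2 ^ k) '0' ++ (List.replicate (2 * 2 ^ k) '1' ++ List.replicate (2 ^ k) '0')
/-- r repetitions of the block. -/
def pvRep (k r : Nat) : List Char := (List.replicate r (pvPat k)).flatten

theorem pvPat_reverse (k : Nat) : (pvPat k).reverse = pvPat k := by
  simp [pvPat, List.reverse_append]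

theorem pvDub_base (k : Nat) : pvDub (pvBase k) = pvPat k := by
  simp only [pvDub, pvBase, pvPat, List.reverse_append, List.reverse_replicate, two_mul]
  rw [List.append_assoc, ← List.append_assoc (List.replicate (2 ^ k) '1'), ← List.replicate_add]

theorem pvRep_one (k : Nat) : pvRep k 1 = pvPat k := by
  simp [pvRep]

theorem pvDub_rep (k r : Nat) : pvDub (pvRep k r) = pvRep k (2 * r) := by
  simp [pvDub, pvRep, List.reverse_flatten, List.map_replicate, pvPat_reverse,
    List.reverse_replicate, two_mul, ← List.flatten_append]

theorem pvDub_iter_rep (k s : Nat) : pvDub^[s] (pvRep k 1) = pvRep k (2 ^ s) := by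
  induction s with
  | zero => simp
  | succ s ih => rw [Function.iterate_succ_apply', ih, pvDub_rep, ← pow_succ']

theorem pvRep_length (k r : Nat) : (pvRep k r).length = r * (4 * 2 ^ k) := by
  simp only [pvRep, pvPat, List.length_flatten, List.map_replicate, List.length_append,
    List.length_replicate, List.sum_replicate, smul_eq_mul]
  ring

/-- the per-row core: A's (N-1-k)-fold reflect-append of the seed is B's truncated repeat. -/
theorem pvRow_eq (N k : Nat) (hk : k < N) :
    pvDub^[N - 1 - k] (pvBase k) =
      (pvRep k (max 1 (2 ^ N / (4 * 2 ^ k)))).take (2 ^ N) := by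
  rcases Nat.lt_or_ge k (N - 1) with h | h
  · -- k ≤ N-2 : the repeat has exactly length 2^N and the take is a no-op
    have ht : N - 1 - k = (N - 2 - k) + 1 := by omega
    have hdiv : 2 ^ N / (4 * 2 ^ k) = 2 ^ (N - 2 - k) := by
      have h4 : 4 * 2 ^ k = 2 ^ (k + 2) := by ring
      rw [h4, Nat.pow_div (by omega) (by norm_num)]
      congr 1; omega
    have hmax : max 1 (2 ^ N / (4 * 2 ^ k)) = 2 ^ (N - 2 - k) := by
      rw [hdiv]; exact max_eq_right Nat.one_le_two_pow
    have hlen : (pvRep k (2 ^ (N - 2 - k))).length = 2 ^ N := by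
      rw [pvRep_length]
      have h4 : 4 * 2 ^ k = 2 ^ (k + 2) := by ring
      rw [h4, ← pow_add]
      congr 1; omega
    rw [hmax, ← hlen, List.take_length, ht, Function.iterate_succ_apply, pvDub_base,
      ← pvRep_one, pvDub_iter_rep]
  · -- k = N-1 : zero reflections; the single block truncated to 2^N = 2·2^k
    have h0 : N - 1 - k = 0 := by omega
    have hN : 2 ^ N = 2 * 2 ^ k := by
      rw [← pow_succ']; congr 1; omega
    have hdiv : 2 ^ N / (4 * 2 ^ k) = 0 := by
      apply Nat.div_eq_of_lt; rw [hN]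
      have := Nat.two_pow_pos k
      omega
    rw [h0, hdiv]
    simp only [Function.iterate_zero, id_eq, Nat.max_eq_left (by omega : 0 ≤ 1)]
    rw [pvRep_one, pvBase, pvPat, hN]
    rw [List.take_append, List.take_of_length_le (by simp [two_mul]),
      List.take_append, List.take_replicate]
    simp [two_mul]

/-- setting index m of a mapped range rewrites the function at m. -/
theorem pv_set_map_range {α : Type} (F : Nat → α) (N m : Nat) (v : α) (_hm : m < N) :
    ((List.range N).map F).set m v = (List.range N).map (fun k => if k = m then v else F k) := by
  apply List.ext_getElem
  · simp
  · intro j h1 h2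
    simp only [List.getElem_set, List.getElem_map, List.getElem_range]
    by_cases hj : m = j
    · simp [hj]
    · simp [hj, show j ≠ m from fun h => hj h.symm]

/-- the shape of both of A's index-assignment loops over a freshly mapped list. -/
theorem pv_foldl_range_set_read {α : Type} [Inhabited α]
    (h : List α → Nat → List α) (g : Nat → α → α) (f : Nat → α) (N : Nat)
    (hb : ∀ (k : Nat) (Q : List α), k < N → Q.length = N →
      h Q k = Q.set k (g k (Q.getD k default))) :
    ∀ m, m ≤ N →
    (List.range m).foldl h ((List.range N).map f)
      = (List.range N).map (fun k => if k < m then g k (f k) else f k) := by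
  intro m
  induction m with
  | zero => intro _; simp
  | succ m ih =>
    intro hm
    rw [List.range_succ, List.foldl_append, ih (by omega)]
    simp only [List.foldl_cons, List.foldl_nil]
    rw [hb m _ (by omega) (by simp)]
    have hget : ((List.range N).map (fun k => if k < m then g k (f k) else f k)).getD m default
        = f m := by
      rw [List.getD_eq_getElem _ _ (by simpa using (by omega : m < N))]
      simp
    rw [hget, pv_set_map_range _ _ _ _ (by omega)]
    apply List.map_congr_left
    intro k _
    by_cases h1 : k = m
    · simp [h1]
    · by_cases h2 : k < m
      · simp [h1, h2, show k < m + 1 by omega]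
      · simp [h1, h2, show ¬ k < m + 1 by omega]

/-- a foldl that ignores its elements is function iteration. -/
theorem pv_foldl_ignore_iterate {α β : Type} (h : α → α) (l : List β) (init : α) :
    l.foldl (fun a _ => h a) init = h^[l.length] init := by
  induction l generalizing init with
  | nil => simp
  | cons x t ih => simp [ih, Function.iterate_succ_apply]

/-- iterating A's in-place `Q[k] += Q[k][::-1]` is one set of the iterated dub. -/
theorem pv_iter_set (k : Nat) (c : Nat) : ∀ (Q : List (List Char)), k < Q.length →
    (fun Q => Q.set k (PySem.List.pyGetD Q (k : Int) [] ++ (PySem.List.pyGetD Q (k : Int) []).reverse))^[c] Q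
      = Q.set k (pvDub^[c] (Q.getD k [])) := by
  induction c with
  | zero =>
    intro Q hQ
    simp only [Function.iterate_zero, id_eq]
    apply List.ext_getElem
    · simp
    · intro j h1 h2
      simp only [List.getElem_set]
      split
      · next hj => rw [List.getD_eq_getElem _ _ (by omega)]; subst hj; rfl
      · rfl
  | succ c ih =>
    intro Q hQ
    rw [Function.iterate_succ_apply', ih Q hQ]
    have hlen : k < (Q.set k (pvDub^[c] (Q.getD k []))).length := by simpa using hQ
    have hget : PySem.List.pyGetD (Q.set k (pvDub^[c] (Q.getD k []))) (k : Int) []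
        = pvDub^[c] (Q.getD k []) := by
      rw [PySem.List.pyGetD_natCast, List.getD_eq_getElem _ _ hlen, List.getElem_set_self]
    rw [hget, List.set_set, Function.iterate_succ_apply']
    rfl

/-- A, normalised: the rows are the reflect-iterated seeds. -/
theorem pvA_eq (n : Int) (hn : 0 < n) :
    get_Carnot_state_headers_py n
      = ((List.range n.toNat).map (fun k => pvDub^[n.toNat - 1 - k] (pvBase k))).map String.ofList := by
  unfold get_Carnot_state_headers_py
  have hn' : ((n.toNat : Int)) = n := Int.toNat_of_nonneg (by omega)
  rw [← hn']
  set N := n.toNat with hN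
  simp only [PySem.List.pyRange_one, sub_zero, Int.toNat_natCast, zero_add, List.foldl_map,
    List.map_map, Function.comp_def]
  have step1 : List.foldl
      (fun (Q : List (List Char)) (k : Nat) =>
        Q.set k (List.replicate (2 ^ k) '0' ++ List.replicate (2 ^ k) '1'))
      (List.map (fun _ => ([] : List Char)) (List.range N)) (List.range N)
      = List.map pvBase (List.range N) := by
    rw [pv_foldl_range_set_read _ (fun k (_ : List Char) => pvBase k) _ N
      (by intro k Q _ _; simp [pvBase]) N (le_refl N)]
    apply List.map_congr_left
    intro k hk
    simp only [List.mem_range] at hk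
    simp [hk]
  rw [step1]
  have step2 : List.foldl
      (fun (Q : List (List Char)) (k : Nat) => List.foldl
        (fun Q _ => Q.set k
          (PySem.List.pyGetD Q (k : Int) [] ++ (PySem.List.pyGetD Q (k : Int) []).reverse)) Q
        (List.range ((N : Int) - ((k : Int) + 1)).toNat))
      (List.map pvBase (List.range N)) (List.range (N - 1))
      = List.map
          (fun k => if k < N - 1 then pvDub^[((N : Int) - ((k : Int) + 1)).toNat] (pvBase k)
            else pvBase k) (List.range N) := by
    apply pv_foldl_range_set_read _
      (fun k s => pvDub^[((N : Int) - ((k : Int) + 1)).toNat] s) pvBase N _ (N - 1) (by omega)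
    intro k Q hkN hQ
    rw [pv_foldl_ignore_iterate, List.length_range]
    exact pv_iter_set k _ Q (by omega)
  rw [show ((N : Int) - 1).toNat = N - 1 from by omega, step2, List.map_map]
  apply List.map_congr_left
  intro k hk
  simp only [List.mem_range] at hk
  simp only [Function.comp_apply]
  by_cases h : k < N - 1
  · rw [if_pos h]
    have hc : ((N : Int) - ((k : Int) + 1)).toNat = N - 1 - k := by omega
    rw [hc]
  · rw [if_neg h]
    have hk1 : N - 1 - k = 0 := by omega
    rw [hk1]
    simp

/-- B, normalised: the rows are the truncated block repeats. -/
theorem pvB_eq (n : Int) (hn : 0 < n) :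
    get_Carnot_state_headers_py_alt n
      = ((List.range n.toNat).map
          (fun k => (pvRep k (max 1 (2 ^ n.toNat / (4 * 2 ^ k)))).take (2 ^ n.toNat))).map String.ofList := by
  unfold get_Carnot_state_headers_py_alt
  rw [if_neg (by omega)]
  have hn' : ((n.toNat : Int)) = n := Int.toNat_of_nonneg (by omega)
  rw [← hn']
  set N := n.toNat with hN
  simp only [Int.toNat_natCast, PySem.List.pyRange_one, sub_zero, List.foldl_map, zero_add]
  rw [PySem.List.foldl_append_singleton_eq_map]
  simp only [List.nil_append, List.map_map]
  apply List.map_congr_left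
  intro k _
  simp only [Function.comp_apply]
  congr 1
  simp only [PySem.List.pyRepeat, pvRep, pvPat, List.append_assoc]
  norm_cast

-- ===== VERDICT (by name: the statement is the Claim_ definition above) =====
theorem get_Carnot_state_headers_py_spec : Claim_equal_get_Carnot_state_headers_py := by
  intro n _
  unfold Spec_get_Carnot_state_headers_py
  by_cases h : n ≤ 0
  · unfold get_Carnot_state_headers_py get_Carnot_state_headers_py_alt
    rw [if_pos h]
    rw [PySem.List.pyRange_one_eq_nil (by omega : n ≤ 0),
      PySem.List.pyRange_one_eq_nil (by omega : n - 1 ≤ 0)]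
    simp
  · rw [pvA_eq n (by omega), pvB_eq n (by omega)]
    apply congrArg
    apply List.map_congr_left
    intro k hk
    exact pvRow_eq n.toNat k (by simpa using hk)
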